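-- pv_equiv track=rewrite | github.com/tosmart01/poly-analysis | analysis_poly/activity_discovery.py | _iter_range_windows
-- ===== SOURCE A (Python) =====
-- def _iter_range_windows(start_ts: int, end_ts: int, window_sec: int) -> list[tuple[int, int]]:
--     if start_ts > end_ts:
--         return []
--
--     windows: list[tuple[int, int]] = []
--     current = start_ts
--     while current <= end_ts:
--         window_end = min(current + window_sec, end_ts)
--         windows.append((current, window_end))
--         current = window_end + 1
--     return windows
-- ===== SOURCE B (Python) =====
-- def _iter_range_windows(start_ts: int, end_ts: int, window_sec: int) -> list[tuple[int, int]]: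
--     k = window_sec + 1
--     span = end_ts - start_ts + 1
--     if span <= 0:
--         return []
--     n = -(-span // k)  # number of windows (ceiling division)
--
--     def build(lo: int, hi: int) -> list[tuple[int, int]]:
--         # windows with indices in [lo, hi), assembled by divide and conquer
--         if hi - lo <= 0:
--             return []
--         if hi - lo == 1:
--             s = start_ts + lo * k
--             return [(s, min(s + window_sec, end_ts))]
--         mid = (lo + hi) // 2
--         return build(lo, mid) + build(mid, hi)
--
--     return build(0, n)
-- ===== Notes on version B (the rewrite author's own statement) =====
-- stated objective: alternative
-- what changed: B first computes the window count n by ceiling division, then assembles the windows by divide-and-conquer recursion on index ranges (each window derived from its index by arithmetic), instead of A's sequential cursor threaded through a while loop.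
import Mathlib
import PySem

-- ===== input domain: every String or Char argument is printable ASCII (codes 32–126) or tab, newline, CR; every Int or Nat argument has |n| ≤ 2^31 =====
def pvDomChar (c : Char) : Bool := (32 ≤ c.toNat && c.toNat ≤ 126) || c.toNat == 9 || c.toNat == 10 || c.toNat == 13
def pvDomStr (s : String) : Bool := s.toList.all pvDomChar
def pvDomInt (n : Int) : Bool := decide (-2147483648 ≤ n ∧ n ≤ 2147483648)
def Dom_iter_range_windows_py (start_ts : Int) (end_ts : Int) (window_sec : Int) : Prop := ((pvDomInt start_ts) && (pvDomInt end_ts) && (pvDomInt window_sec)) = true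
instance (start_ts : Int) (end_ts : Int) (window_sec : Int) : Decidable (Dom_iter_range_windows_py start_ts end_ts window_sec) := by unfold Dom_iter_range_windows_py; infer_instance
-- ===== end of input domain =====

-- B replaces A's cursor-threading while loop by a window count obtained by ceiling
-- division followed by a divide-and-conquer assembly of the windows from their indices
-- (objective: alternative). Equivalence is claimed on Pre_ (window_sec ≥ 0 or empty
-- range); elsewhere Python A never returns (infinite loop).

-- ===== PORT A =====
-- the while loop, with fuel as a totality guard only: with window_sec ≥ 0 the cursor
-- advances by at least 1 each iteration, so fuel (end_ts + 1 - start_ts).toNat is never exhausted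
def iterWinLoop (end_ts : Int) (window_sec : Int) : Int → Nat → List (Int × Int)
  | _, 0 => []
  | current, fuel + 1 =>
    if current ≤ end_ts then
      let window_end := min (current + window_sec) end_ts
      (current, window_end) :: iterWinLoop end_ts window_sec (window_end + 1) fuel
    else []

def iter_range_windows_py (start_ts : Int) (end_ts : Int) (window_sec : Int) : List (Int × Int) :=
  if start_ts > end_ts then []
  else iterWinLoop end_ts window_sec start_ts (end_ts + 1 - start_ts).toNat

-- ===== PORT B =====
-- Source B's inner 'build': windows with indices in [lo, hi), assembled by divide and conquer
def buildWin (start_ts : Int) (end_ts : Int) (window_sec : Int) (k : Int) (lo : Int) (hi : Int) :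
    List (Int × Int) :=
  if hi - lo ≤ 0 then []
  else if hi - lo = 1 then
    let s := start_ts + lo * k
    [(s, min (s + window_sec) end_ts)]
  else
    buildWin start_ts end_ts window_sec k lo (PySem.Int.floordiv (lo + hi) 2) ++
    buildWin start_ts end_ts window_sec k (PySem.Int.floordiv (lo + hi) 2) hi
termination_by (hi - lo).toNat
decreasing_by
  all_goals
    simp only [PySem.Int.floordiv_eq_ediv_of_pos (by omega : (0:Int) < 2)]
    omega

def iter_range_windows_py_alt (start_ts : Int) (end_ts : Int) (window_sec : Int) : List (Int × Int) :=
  let k := window_sec + 1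
  let span := end_ts - start_ts + 1
  if span ≤ 0 then []
  else buildWin start_ts end_ts window_sec k 0 (-(PySem.Int.floordiv (-span) k))

-- ===== PRECONDITION & SPEC =====
-- Pre_ excludes only window_sec < 0 with start_ts ≤ end_ts: there Python A loops forever
-- (the cursor never advances past end_ts) and returns nothing.
def Pre_iter_range_windows_py (start_ts : Int) (end_ts : Int) (window_sec : Int) : Prop :=
  start_ts > end_ts ∨ 0 ≤ window_sec
instance (start_ts : Int) (end_ts : Int) (window_sec : Int) : Decidable (Pre_iter_range_windows_py start_ts end_ts window_sec) := by unfold Pre_iter_range_windows_py; infer_instance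

def pvWitness_iter_range_windows_py : Int × Int × Int := (0, 10, 3)

def Spec_iter_range_windows_py (start_ts : Int) (end_ts : Int) (window_sec : Int) (out : List (Int × Int)) : Prop := out = iter_range_windows_py_alt start_ts end_ts window_sec
instance (start_ts : Int) (end_ts : Int) (window_sec : Int) (out : List (Int × Int)) : Decidable (Spec_iter_range_windows_py start_ts end_ts window_sec out) := by unfold Spec_iter_range_windows_py; infer_instance

-- ===== CLAIM (what is proved, stated in full; the proofs are below) =====
def Claim_equal_iter_range_windows_py : Prop := ∀ (start_ts : Int) (end_ts : Int) (window_sec : Int), Dom_iter_range_windows_py start_ts end_ts window_sec → Pre_iter_range_windows_py start_ts end_ts window_sec → Spec_iter_range_windows_py start_ts end_ts window_sec (iter_range_windows_py start_ts end_ts window_sec)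

-- ===== LEMMAS AND PROOFS =====

theorem pyRange_pos_eq_nil (a b s : Int) (hs : 0 < s) (h : b ≤ a) :
    PySem.List.pyRange a b s = [] := by
  rw [PySem.List.pyRange_of_pos a b hs, if_neg (not_lt.mpr h)]
  simp

theorem pyRange_pos_cons (a b s : Int) (hs : 0 < s) (hab : a < b) :
    PySem.List.pyRange a b s = a :: PySem.List.pyRange (a + s) b s := by
  rw [PySem.List.pyRange_of_pos a b hs, PySem.List.pyRange_of_pos (a + s) b hs]
  have hs0 : s ≠ 0 := ne_of_gt hs
  have hkey : (b - a + s - 1) / s = (b - (a + s) + s - 1) / s + 1 := by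
    have h1 : b - a + s - 1 = (b - (a + s) + s - 1) + 1 * s := by ring
    rw [h1, Int.add_mul_ediv_right _ _ hs0]
  by_cases hb : a + s < b
  · rw [if_pos hab, if_pos hb, hkey]
    have hnn : 0 ≤ (b - (a + s) + s - 1) / s :=
      Int.ediv_nonneg (by omega) (le_of_lt hs)
    have ht : ((b - (a + s) + s - 1) / s + 1).toNat = ((b - (a + s) + s - 1) / s).toNat + 1 := by
      omega
    rw [ht, List.range_succ_eq_map, List.map_cons, List.map_map]
    refine List.cons_eq_cons.mpr ⟨by simp, ?_⟩
    apply List.map_congr_left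
    intro k _
    simp only [Function.comp_apply, Nat.succ_eq_add_one]
    push_cast
    ring
  · rw [if_pos hab, if_neg hb]
    have hz : (b - (a + s) + s - 1) / s = 0 :=
      Int.ediv_eq_zero_of_lt (by omega) (by omega)
    rw [hkey, hz]
    simp

theorem iterWinLoop_nil (e w c : Int) (fuel : Nat) (h : e < c) :
    iterWinLoop e w c fuel = [] := by
  cases fuel with
  | zero => rfl
  | succ n => simp [iterWinLoop, not_le.mpr h]

theorem iterWinLoop_eq_map (e w : Int) (hw : 0 ≤ w) :
    ∀ (fuel : Nat) (c : Int), (e + 1 - c).toNat ≤ fuel →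
      iterWinLoop e w c fuel =
        (PySem.List.pyRange c (e + 1) (w + 1)).map (fun s => (s, min (s + w) e)) := by
  intro fuel
  induction fuel with
  | zero =>
    intro c hf
    have hc : e < c := by omega
    rw [iterWinLoop_nil e w c 0 hc, pyRange_pos_eq_nil c (e + 1) (w + 1) (by omega) (by omega)]
    simp
  | succ n ih =>
    intro c hf
    by_cases hc : c ≤ e
    · rw [pyRange_pos_cons c (e + 1) (w + 1) (by omega) (by omega), List.map_cons]
      simp only [iterWinLoop, if_pos hc]
      by_cases hstep : c + w ≤ e
      · have hmin : min (c + w) e = c + w := min_eq_left hstep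
        rw [hmin]
        have : c + w + 1 = c + (w + 1) := by ring
        rw [← this, ih (c + w + 1) (by omega)]
      · have hmin : min (c + w) e = e := min_eq_right (by omega)
        rw [hmin]
        rw [iterWinLoop_nil e w (e + 1) n (by omega),
            pyRange_pos_eq_nil (c + (w + 1)) (e + 1) (w + 1) (by omega) (by omega)]
        simp
    · rw [iterWinLoop_nil e w c (n + 1) (by omega),
          pyRange_pos_eq_nil c (e + 1) (w + 1) (by omega) (by omega)]
      simp

-- divide and conquer over an index interval = the map over its indices
theorem buildWin_eq_map (s e w k : Int) :
    ∀ (m : Nat) (lo hi : Int), (hi - lo).toNat = m →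
      buildWin s e w k lo hi =
        (List.range m).map
          (fun (i : Nat) => (s + (lo + (i : Int)) * k, min (s + (lo + (i : Int)) * k + w) e)) := by
  intro m
  induction m using Nat.strong_induction_on with
  | _ m ih =>
    intro lo hi hm
    rw [buildWin]
    by_cases h0 : hi - lo ≤ 0
    · rw [if_pos h0]
      have : m = 0 := by omega
      subst this
      simp
    · rw [if_neg h0]
      by_cases h1 : hi - lo = 1
      · rw [if_pos h1]
        have : m = 1 := by omega
        subst this
        simp
      · rw [if_neg h1]
        have hmid : PySem.Int.floordiv (lo + hi) 2 = (lo + hi) / 2 :=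
          PySem.Int.floordiv_eq_ediv_of_pos (by omega)
        have hlt : lo < (lo + hi) / 2 ∧ (lo + hi) / 2 < hi := by omega
        rw [hmid]
        have hm1 : ((lo + hi) / 2 - lo).toNat < m := by omega
        have hm2 : (hi - (lo + hi) / 2).toNat < m := by omega
        rw [ih _ hm1 lo ((lo + hi) / 2) rfl, ih _ hm2 ((lo + hi) / 2) hi rfl]
        have hsplit : m = ((lo + hi) / 2 - lo).toNat + (hi - (lo + hi) / 2).toNat := by omega
        rw [hsplit, List.range_add, List.map_append, List.map_map]
        congr 1
        apply List.map_congr_left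
        intro i _
        have hmid2 : (lo + hi) / 2 = lo + (((lo + hi) / 2 - lo).toNat : Int) := by omega
        simp only [Function.comp_apply]
        rw [hmid2]
        push_cast
        ring_nf
        simp only [Int.toNat_natCast]
        rw [Prod.ext_iff]
        constructor
        · ring_nf
        · congr 1
          ring_nf

-- ceiling division -(-a // k) = (a + k - 1) / k for positive k
theorem neg_floordiv_neg_eq_ceil (a k : Int) (hk : 0 < k) :
    -(PySem.Int.floordiv (-a) k) = (a + k - 1) / k := by
  rw [PySem.Int.neg_floordiv_neg_eq_iff_of_pos hk]
  have hdm := Int.mul_ediv_add_emod (a + k - 1) k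
  have hr0 := Int.emod_nonneg (a + k - 1) (ne_of_gt hk)
  have hrk := Int.emod_lt_of_pos (a + k - 1) hk
  constructor
  · nlinarith [hdm]
  · nlinarith [hdm]

-- ===== VERDICT (by name: the statement is the Claim_ definition above) =====
theorem iter_range_windows_py_spec : Claim_equal_iter_range_windows_py := by
  intro s e w _dom hpre
  unfold Spec_iter_range_windows_py iter_range_windows_py iter_range_windows_py_alt
  by_cases hse : s > e
  · rw [if_pos hse, if_pos (by omega : e - s + 1 ≤ 0)]
  · rw [if_neg hse, if_neg (by omega : ¬ e - s + 1 ≤ 0)]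
    have hw : 0 ≤ w := by
      cases hpre with
      | inl h => exact absurd h hse
      | inr h => exact h
    have hk : (0:Int) < w + 1 := by omega
    rw [iterWinLoop_eq_map e w hw _ s (le_refl _),
        PySem.List.pyRange_of_pos s (e + 1) hk, if_pos (by omega : s < e + 1)]
    have hceil : -(PySem.Int.floordiv (-(e - s + 1)) (w + 1)) = (e - s + 1 + (w + 1) - 1) / (w + 1) :=
      neg_floordiv_neg_eq_ceil (e - s + 1) (w + 1) hk
    have hsame : (e + 1 - s + (w + 1) - 1) / (w + 1) = (e - s + 1 + (w + 1) - 1) / (w + 1) := by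
      ring_nf
    have hnn : 0 ≤ (e - s + 1 + (w + 1) - 1) / (w + 1) :=
      Int.ediv_nonneg (by omega) (by omega)
    rw [buildWin_eq_map s e w (w + 1) ((e - s + 1 + (w + 1) - 1) / (w + 1)).toNat 0
          (-(PySem.Int.floordiv (-(e - s + 1)) (w + 1))) (by rw [hceil]; omega),
        List.map_map, hsame]
    apply List.map_congr_left
    intro i _
    simp only [Function.comp_apply]
    refine Prod.ext ?_ ?_ <;> simp <;> ring_nf
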